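-- pv_equiv track=rewrite | github.com/sanfx/git-maildiff | emaildiff/maildiff_cmd.py | _traditional_diff
-- ===== SOURCE A (Python) =====
-- def _traditional_diff(linesfromDiff, openTag, openTagEnd, nbsp):
-- 	lines = []
-- 	line_num = 0
--
-- 	def updateLine(line_num, color, line):
-- 		tabs = line.count('\t')
-- 		lines.append("%s:%s#%s%s%s%s</span><br>" %
-- 		((repr(line_num), openTag, color, openTagEnd, nbsp*tabs, line)))
-- 		return lines
--
-- 	for line in linesfromDiff:
-- 		if (line.startswith('diff ') or
-- 				line.startswith('index ') or
-- 				line.startswith('--- ')):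
-- 			color = "10EDF5"
-- 			updateLine(line_num, color, line)
-- 			continue
--
-- 		if line.startswith('-'):
-- 			color = "ff0000"
-- 			updateLine(line_num, color, line)
-- 			continue
--
--
-- 		if line.startswith('+++ '):
-- 			color = "07CB14"
-- 			updateLine(line_num, color, line)
-- 			continue
--
-- 		if line.startswith('@@ '):
-- 			_, old_nr, new_nr, _ = line.split(' ', 3)
-- 			line_num = int(new_nr.split(',')[0])
-- 			color = "5753BE"
-- 			updateLine(line_num, color, line)
-- 			continue
--
-- 		if line.startswith('+'):
-- 			color = "007900"
-- 			updateLine(line_num, color, line)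
--
-- 		if line.startswith('+') or line.startswith(' '):
-- 			line_num += 1
--
-- 	return ''.join(lines)
-- ===== SOURCE B (Python) =====
-- def _traditional_diff(linesfromDiff, openTag, openTagEnd, nbsp):
--     # Staged pipeline instead of one stateful cascade:
--     # stage 1 scans the displayed line number for every line, stage 2 is a
--     # stateless prefix->color classification, stage 3 joins the formatted
--     # fragments of the colored lines over the zipped stream.
--
--     def scan_step(n, line):
--         # (number to display for this line, counter for the next line)
--         if line.startswith('@@ '):
--             m = int(line.split(' ', 3)[2].split(',')[0])
--             return m, m
--         if line.startswith(' ') or (line.startswith('+')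
--                                     and not line.startswith('+++ ')):
--             return n, n + 1
--         return n, n
--
--     nums = []
--     n = 0
--     for line in linesfromDiff:
--         d, n = scan_step(n, line)
--         nums.append(d)
--
--     def color_of(line):
--         if line.startswith(('diff ', 'index ', '--- ')):
--             return "10EDF5"
--         if line.startswith('-'):
--             return "ff0000"
--         if line.startswith('+++ '):
--             return "07CB14"
--         if line.startswith('@@ '):
--             return "5753BE"
--         if line.startswith('+'):
--             return "007900"
--         return None
--
--     return ''.join(
--         "%s:%s#%s%s%s%s</span><br>" % (
--             repr(d), openTag, c, openTagEnd, nbsp * line.count('\t'), line)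
--         for line, d in zip(linesfromDiff, nums)
--         for c in (color_of(line),) if c is not None)
-- ===== Notes on version B (the rewrite author's own statement) =====
-- stated objective: alternative
-- what changed: A's single stateful if/continue cascade with an appending closure is replaced by a staged pipeline: a pure scan that first computes the displayed line number for every line, a stateless prefix->color classifier, and a final join over the zipped (line, number) stream.
import Mathlib
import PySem

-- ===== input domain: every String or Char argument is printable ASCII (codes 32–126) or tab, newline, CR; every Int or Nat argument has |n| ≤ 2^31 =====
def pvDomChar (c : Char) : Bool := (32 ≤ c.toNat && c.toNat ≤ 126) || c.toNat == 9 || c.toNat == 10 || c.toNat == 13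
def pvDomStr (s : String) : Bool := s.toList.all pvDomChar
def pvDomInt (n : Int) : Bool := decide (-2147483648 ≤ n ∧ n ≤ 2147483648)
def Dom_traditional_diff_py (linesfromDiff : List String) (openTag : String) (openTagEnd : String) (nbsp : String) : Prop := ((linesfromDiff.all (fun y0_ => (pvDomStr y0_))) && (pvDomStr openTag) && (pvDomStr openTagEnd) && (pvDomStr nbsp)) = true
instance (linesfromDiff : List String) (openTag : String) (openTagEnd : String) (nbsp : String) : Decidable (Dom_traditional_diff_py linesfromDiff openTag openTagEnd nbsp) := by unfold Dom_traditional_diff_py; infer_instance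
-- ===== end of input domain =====

-- ===== PORT A =====
-- B mutates nothing; header: B replaces A's single stateful if/continue cascade by a staged
-- pipeline (number scan, stateless color classification, join over the zipped stream);
-- same output, alternative decomposition.

-- shared formatting helper: both Pythons format a kept line with the same % template
-- ("%s:%s#%s%s%s%s</span><br>" with repr(num), openTag, color, openTagEnd, nbsp*tabs, line);
-- nbsp * tabs is ported exactly as tabs concatenated copies of nbsp.
def tdpyFmt (num : Int) (color : List Char) (openTag openTagEnd nbsp : String) (line : String) : List Char :=
  PySem.Int.toChars num ++ ":".toList ++ openTag.toList ++ "#".toList ++ color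
    ++ openTagEnd.toList ++ (List.replicate (PySem.Str.count line "\t") nbsp.toList).flatten
    ++ line.toList ++ "</span><br>".toList

-- one iteration of A's for-loop (the if/continue cascade, in A's order); state = (lines, line_num)
def tdpyStepA (openTag openTagEnd nbsp : String) (st : List (List Char) × Int) (line : String) :
    List (List Char) × Int :=
  let (lines, line_num) := st
  if PySem.Str.startswith line "diff " || PySem.Str.startswith line "index "
      || PySem.Str.startswith line "--- " then
    (lines ++ [tdpyFmt line_num "10EDF5".toList openTag openTagEnd nbsp line], line_num)
  else if PySem.Str.startswith line "-" then
    (lines ++ [tdpyFmt line_num "ff0000".toList openTag openTagEnd nbsp line], line_num)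
  else if PySem.Str.startswith line "+++ " then
    (lines ++ [tdpyFmt line_num "07CB14".toList openTag openTagEnd nbsp line], line_num)
  else if PySem.Str.startswith line "@@ " then
    -- `_, old_nr, new_nr, _ = line.split(' ', 3)` needs exactly 4 parts, then int(new_nr.split(',')[0]);
    -- Python raises otherwise (excluded by Pre_); the fallback arms are unreachable under Pre_.
    match (PySem.Str.splitMax? line " " 3).getD [] with
    | [_, _old_nr, new_nr, _] =>
      let n := (PySem.Int.ofStr? (((PySem.Str.split? new_nr ",").getD []).headD "")).getD 0
      (lines ++ [tdpyFmt n "5753BE".toList openTag openTagEnd nbsp line], n)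
    | _ => (lines, line_num)
  else
    -- the last two ifs of A's loop body (no continue between them)
    let lines' := if PySem.Str.startswith line "+" then
        lines ++ [tdpyFmt line_num "007900".toList openTag openTagEnd nbsp line]
      else lines
    let line_num' := if PySem.Str.startswith line "+" || PySem.Str.startswith line " " then
        line_num + 1
      else line_num
    (lines', line_num')

def traditional_diff_py (linesfromDiff : List String) (openTag : String) (openTagEnd : String) (nbsp : String) : String :=
  let st := linesfromDiff.foldl (tdpyStepA openTag openTagEnd nbsp) ([], 0)
  String.ofList (PySem.Chars.join [] st.1)   -- ''.join(lines)

-- ===== PORT B =====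
-- stage 1 step: (number displayed for this line, counter for the next line)
def tdpyScanStep (n : Int) (line : String) : Int × Int :=
  if PySem.Str.startswith line "@@ " then
    -- line.split(' ', 3)[2].split(',')[0]; Python raises when absent or non-int (outside Pre_)
    let m := (PySem.Int.ofStr? (((PySem.Str.split? (((PySem.Str.splitMax? line " " 3).getD []).getD 2 "") ",").getD []).headD "")).getD 0
    (m, m)
  else if PySem.Str.startswith line " "
      || (PySem.Str.startswith line "+" && !PySem.Str.startswith line "+++ ") then
    (n, n + 1)
  else (n, n)

-- stage 2: stateless prefix -> color classification
def tdpyColorOf (line : String) : Option (List Char) :=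
  if PySem.Str.startswith line "diff " || PySem.Str.startswith line "index "
      || PySem.Str.startswith line "--- " then some "10EDF5".toList
  else if PySem.Str.startswith line "-" then some "ff0000".toList
  else if PySem.Str.startswith line "+++ " then some "07CB14".toList
  else if PySem.Str.startswith line "@@ " then some "5753BE".toList
  else if PySem.Str.startswith line "+" then some "007900".toList
  else none

-- stage 3: one fragment of the joined generator expression
def tdpyEmit (openTag openTagEnd nbsp : String) (p : String × Int) : List Char :=
  match tdpyColorOf p.1 with
  | some c => tdpyFmt p.2 c openTag openTagEnd nbsp p.1
  | none => []

def traditional_diff_py_alt (linesfromDiff : List String) (openTag : String) (openTagEnd : String) (nbsp : String) : String :=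
  -- stage 1: nums list built by the scan loop
  let nums := (linesfromDiff.foldl
    (fun (s : Int × List Int) line =>
      let d := tdpyScanStep s.1 line
      (d.2, s.2 ++ [d.1])) (0, [])).2
  -- stage 3: ''.join over zip(linesfromDiff, nums)
  String.ofList ((linesfromDiff.zip nums).flatMap (tdpyEmit openTag openTagEnd nbsp))

-- ===== PRECONDITION & SPEC =====
-- Pre_ excludes exactly the inputs on which A raises: a line starting with '@@ ' whose
-- split(' ', 3) does not have exactly 4 parts (ValueError on unpacking) or whose third part's
-- leading comma-field is not an int literal (ValueError in int()).
def Pre_traditional_diff_py (linesfromDiff : List String) (openTag : String) (openTagEnd : String) (nbsp : String) : Prop :=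
  ∀ line ∈ linesfromDiff, PySem.Str.startswith line "@@ " = true →
    ((PySem.Str.splitMax? line " " 3).getD []).length = 4 ∧
    (PySem.Int.ofStr? (((PySem.Str.split? (((PySem.Str.splitMax? line " " 3).getD []).getD 2 "") ",").getD []).headD "")).isSome = true
instance (linesfromDiff : List String) (openTag : String) (openTagEnd : String) (nbsp : String) : Decidable (Pre_traditional_diff_py linesfromDiff openTag openTagEnd nbsp) := by unfold Pre_traditional_diff_py; infer_instance

def pvWitness_traditional_diff_py : List String × String × String × String :=
  (["diff --git a/x b/x", "index 12..34", "--- a/x", "+++ b/x", "@@ -1,2 +3,4 @@", " ctx", "-old", "+new\tz", "other"],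
   "<span style=\"color:", "\">", "&nbsp;")

def Spec_traditional_diff_py (linesfromDiff : List String) (openTag : String) (openTagEnd : String) (nbsp : String) (out : String) : Prop := out = traditional_diff_py_alt linesfromDiff openTag openTagEnd nbsp
instance (linesfromDiff : List String) (openTag : String) (openTagEnd : String) (nbsp : String) (out : String) : Decidable (Spec_traditional_diff_py linesfromDiff openTag openTagEnd nbsp out) := by unfold Spec_traditional_diff_py; infer_instance

-- ===== CLAIM (what is proved, stated in full; the proofs are below) =====
def Claim_equal_traditional_diff_py : Prop := ∀ (linesfromDiff : List String) (openTag : String) (openTagEnd : String) (nbsp : String), Dom_traditional_diff_py linesfromDiff openTag openTagEnd nbsp → Pre_traditional_diff_py linesfromDiff openTag openTagEnd nbsp → Spec_traditional_diff_py linesfromDiff openTag openTagEnd nbsp (traditional_diff_py linesfromDiff openTag openTagEnd nbsp)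

-- ===== LEMMAS AND PROOFS =====

lemma tdpy_joinNil (xs : List (List Char)) : PySem.Chars.join [] xs = xs.flatten := by
  induction xs with
  | nil => rfl
  | cons a t ih => cases t <;> simp_all [PySem.Chars.join, List.intercalate]

-- if line starts with p then line's first char is p's first char
lemma tdpy_sw_head (line p : String) (c : Char) (h : PySem.Str.startswith line p = true)
    (hc : p.toList.head? = some c) : line.toList.head? = some c := by
  have h' : p.toList <+: line.toList := by
    have := PySem.Str.startswith_eq line p
    rw [this] at h
    exact (PySem.Chars.startswith_iff _ _).mp h
  rcases h' with ⟨t, ht⟩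
  rw [← ht]
  cases hp : p.toList with
  | nil => rw [hp] at hc; simp at hc
  | cons a s => rw [hp] at hc; simp at hc; simp [hc]

-- the recursive form of B's number scan (proof-side only)
def tdpyScan : Int → List String → List Int
  | _, [] => []
  | n, l :: t => (tdpyScanStep n l).1 :: tdpyScan (tdpyScanStep n l).2 t

-- B's stage-1 foldl computes tdpyScan
lemma tdpy_fold_scan (ls : List String) (n : Int) (acc : List Int) :
    (ls.foldl (fun (s : Int × List Int) line =>
        let d := tdpyScanStep s.1 line
        (d.2, s.2 ++ [d.1])) (n, acc)).2 = acc ++ tdpyScan n ls := by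
  induction ls generalizing n acc with
  | nil => simp [tdpyScan]
  | cons l t ih => simp [tdpyScan, ih, List.append_assoc]

-- one iteration of A's cascade = emit + scan step of B (under Pre_'s 4-part condition for '@@ ')
lemma tdpy_step (openTag openTagEnd nbsp line : String) (acc : List (List Char)) (num : Int)
    (h : PySem.Str.startswith line "@@ " = true →
      ((PySem.Str.splitMax? line " " 3).getD []).length = 4) :
    tdpyStepA openTag openTagEnd nbsp (acc, num) line =
      (acc ++ (match tdpyColorOf line with
               | some c => [tdpyFmt (tdpyScanStep num line).1 c openTag openTagEnd nbsp line]
               | none => []),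
       (tdpyScanStep num line).2) := by
  by_cases h1 : PySem.Str.startswith line "diff " = true
  · have hd := tdpy_sw_head line "diff " 'd' h1 rfl
    have e1 : PySem.Str.startswith line "@@ " = false := by
      by_contra hx; simp at hx
      have := tdpy_sw_head line "@@ " '@' hx rfl; simp_all
    have e2 : PySem.Str.startswith line " " = false := by
      by_contra hx; simp at hx
      have := tdpy_sw_head line " " ' ' hx rfl; simp_all
    have e3 : PySem.Str.startswith line "+" = false := by
      by_contra hx; simp at hx
      have := tdpy_sw_head line "+" '+' hx rfl; simp_all
    clear h; simp_all [tdpyStepA, tdpyColorOf, tdpyScanStep]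
  · by_cases h2 : PySem.Str.startswith line "index " = true
    · have hd := tdpy_sw_head line "index " 'i' h2 rfl
      have e1 : PySem.Str.startswith line "@@ " = false := by
        by_contra hx; simp at hx
        have := tdpy_sw_head line "@@ " '@' hx rfl; simp_all
      have e2 : PySem.Str.startswith line " " = false := by
        by_contra hx; simp at hx
        have := tdpy_sw_head line " " ' ' hx rfl; simp_all
      have e3 : PySem.Str.startswith line "+" = false := by
        by_contra hx; simp at hx
        have := tdpy_sw_head line "+" '+' hx rfl; simp_all
      clear h; simp_all [tdpyStepA, tdpyColorOf, tdpyScanStep]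
    · by_cases h4 : PySem.Str.startswith line "-" = true
      -- covers both the '--- ' branch and the bare '-' branch of A
      · have hd := tdpy_sw_head line "-" '-' h4 rfl
        have e1 : PySem.Str.startswith line "@@ " = false := by
          by_contra hx; simp at hx
          have := tdpy_sw_head line "@@ " '@' hx rfl; simp_all
        have e2 : PySem.Str.startswith line " " = false := by
          by_contra hx; simp at hx
          have := tdpy_sw_head line " " ' ' hx rfl; simp_all
        have e3 : PySem.Str.startswith line "+" = false := by
          by_contra hx; simp at hx
          have := tdpy_sw_head line "+" '+' hx rfl; simp_all
        clear h; by_cases h3 : PySem.Str.startswith line "--- " = true <;>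
          simp_all [tdpyStepA, tdpyColorOf, tdpyScanStep]
      · by_cases h3 : PySem.Str.startswith line "--- " = true
        · exact absurd (tdpy_sw_head line "--- " '-' h3 rfl) (by
            intro hx
            have : PySem.Str.startswith line "-" = true := by
              have := PySem.Str.startswith_eq line "-"
              rw [this, PySem.Chars.startswith_iff]
              cases hl : line.toList with
              | nil => rw [hl] at hx; simp at hx
              | cons a s => rw [hl] at hx; simp at hx; simp [hx, List.IsPrefix]
            simp_all)
        · by_cases h5 : PySem.Str.startswith line "+++ " = true
          · have hd := tdpy_sw_head line "+++ " '+' h5 rfl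
            have e1 : PySem.Str.startswith line "@@ " = false := by
              by_contra hx; simp at hx
              have := tdpy_sw_head line "@@ " '@' hx rfl; simp_all
            have e2 : PySem.Str.startswith line " " = false := by
              by_contra hx; simp at hx
              have := tdpy_sw_head line " " ' ' hx rfl; simp_all
            clear h; simp_all [tdpyStepA, tdpyColorOf, tdpyScanStep]
          · by_cases h6 : PySem.Str.startswith line "@@ " = true
            · have hlen := h h6
              rcases hp : (PySem.Str.splitMax? line " " 3).getD [] with _ | ⟨a, _ | ⟨b, _ | ⟨c, _ | ⟨d, rest⟩⟩⟩⟩ <;>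
                rw [hp] at hlen <;> simp at hlen
              subst hlen
              simp only [tdpyStepA, tdpyColorOf, tdpyScanStep, hp, h1, h2, h3, h4, h5, h6]
              simp_all
            · by_cases h7 : PySem.Str.startswith line "+" = true
              · have e2 : PySem.Str.startswith line " " = false := by
                  by_contra hx; simp at hx
                  have := tdpy_sw_head line " " ' ' hx rfl
                  have := tdpy_sw_head line "+" '+' h7 rfl; simp_all
                clear h; simp_all [tdpyStepA, tdpyColorOf, tdpyScanStep]
              · clear h; by_cases h8 : PySem.Str.startswith line " " = true <;>
                  simp_all [tdpyStepA, tdpyColorOf, tdpyScanStep]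

-- main invariant: A's fold, flattened, is the emission over the zipped scan
lemma tdpy_main (openTag openTagEnd nbsp : String) (ls : List String) (num : Int) (acc : List (List Char))
    (h : ∀ line ∈ ls, PySem.Str.startswith line "@@ " = true →
      ((PySem.Str.splitMax? line " " 3).getD []).length = 4) :
    (ls.foldl (tdpyStepA openTag openTagEnd nbsp) (acc, num)).1.flatten =
      acc.flatten ++ (ls.zip (tdpyScan num ls)).flatMap (tdpyEmit openTag openTagEnd nbsp) := by
  induction ls generalizing num acc with
  | nil => simp [tdpyScan]
  | cons l t ih =>
    simp only [List.foldl_cons]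
    rw [tdpy_step openTag openTagEnd nbsp l acc num (h l (by simp))]
    have ht : ∀ line ∈ t, PySem.Str.startswith line "@@ " = true →
        ((PySem.Str.splitMax? line " " 3).getD []).length = 4 :=
      fun line hl => h line (by simp [hl])
    rw [ih _ _ ht]
    simp only [tdpyScan, List.zip_cons_cons, List.flatMap_cons, tdpyEmit]
    cases tdpyColorOf l <;> simp [List.append_assoc]

-- ===== VERDICT (by name: the statement is the Claim_ definition above) =====
theorem traditional_diff_py_spec : Claim_equal_traditional_diff_py := by
  intro ls openTag openTagEnd nbsp _ hpre
  unfold Spec_traditional_diff_py traditional_diff_py traditional_diff_py_alt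
  have h := tdpy_main openTag openTagEnd nbsp ls 0 [] (fun l hl hs => (hpre l hl hs).1)
  simp only [tdpy_joinNil, tdpy_fold_scan, List.nil_append, List.flatten_nil] at h ⊢
  rw [h]
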